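-- pv_equiv track=rewrite | github.com/nerocca/ECE-285-Final-Project | export_curves.py | pick_loss_tag_for_derived_perplexity
-- ===== SOURCE A (Python) =====
-- def pick_loss_tag_for_derived_perplexity(tags):
--     priority = [
--         "Loss/val_step",
--         "Loss/val_epoch",
--         "Eval/loss",
--         "Test/Loss",
--         "Loss/val",
--     ]
--     for t in priority:
--         if t in tags:
--             return t
--     for t in tags:
--         tl = t.lower()
--         if "loss" in tl and ("val" in tl or "eval" in tl or "test" in tl):
--             return t
--     for t in tags:
--         if "loss" in t.lower():
--             return t
--     return None
-- ===== SOURCE B (Python) =====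
-- def pick_loss_tag_for_derived_perplexity(tags):
--     for t in ["Loss/val_step", "Loss/val_epoch", "Eval/loss", "Test/Loss", "Loss/val"]:
--         if t in tags:
--             return t
--     strong = None
--     weak = None
--     for t in tags:
--         tl = t.lower()
--         if "loss" in tl:
--             if weak is None:
--                 weak = t
--             if strong is None and ("val" in tl or "eval" in tl or "test" in tl):
--                 strong = t
--     return strong if strong is not None else weak
-- ===== Notes on version B (the rewrite author's own statement) =====
-- stated objective: simpler
-- what changed: Replaces A's two separate fallback scans over tags with a single pass that records the first strong ('loss'+val/eval/test) and first weak ('loss') candidates, then returns strong-else-weak.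
import Mathlib
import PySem

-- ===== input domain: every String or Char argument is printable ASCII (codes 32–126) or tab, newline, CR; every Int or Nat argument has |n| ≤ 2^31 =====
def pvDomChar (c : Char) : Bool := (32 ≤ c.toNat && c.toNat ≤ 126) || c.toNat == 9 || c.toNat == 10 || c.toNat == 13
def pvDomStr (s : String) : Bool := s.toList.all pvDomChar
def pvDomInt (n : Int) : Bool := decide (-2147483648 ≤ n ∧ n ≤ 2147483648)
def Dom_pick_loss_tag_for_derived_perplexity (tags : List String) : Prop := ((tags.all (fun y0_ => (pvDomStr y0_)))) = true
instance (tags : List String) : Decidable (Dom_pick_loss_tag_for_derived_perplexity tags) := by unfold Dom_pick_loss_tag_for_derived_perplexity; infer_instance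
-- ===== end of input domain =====

-- B merges A's two fallback scans into one pass keeping first strong/weak candidates; objective: simpler.

-- ===== PORT A =====
def pvPriority : List String :=
  ["Loss/val_step", "Loss/val_epoch", "Eval/loss", "Test/Loss", "Loss/val"]

-- strong predicate: tl = t.lower(); "loss" in tl and ("val" in tl or "eval" in tl or "test" in tl)
def pvStrong (t : String) : Bool :=
  let tl := PySem.Str.lower t
  PySem.Str.isIn "loss" tl && (PySem.Str.isIn "val" tl || PySem.Str.isIn "eval" tl || PySem.Str.isIn "test" tl)

-- weak predicate: "loss" in t.lower()
def pvWeak (t : String) : Bool := PySem.Str.isIn "loss" (PySem.Str.lower t)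

-- first loop: for t in priority: if t in tags: return t
-- then: for t in tags: … return t on strong; then: for t in tags: … return t on weak; else None
def pick_loss_tag_for_derived_perplexity (tags : List String) : Option String :=
  match pvPriority.find? (fun t => tags.contains t) with
  | some t => some t
  | none =>
    match tags.find? pvStrong with
    | some t => some t
    | none => tags.find? pvWeak

-- ===== PORT B =====
-- single fallback pass keeping the first strong and first weak candidates
def pvStep (sw : Option String × Option String) (t : String) : Option String × Option String :=
  let tl := PySem.Str.lower t
  if PySem.Str.isIn "loss" tl then
    let weak := if sw.2 = none then some t else sw.2
    let strong :=
      if sw.1 = none && (PySem.Str.isIn "val" tl || PySem.Str.isIn "eval" tl || PySem.Str.isIn "test" tl)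
      then some t else sw.1
    (strong, weak)
  else sw

def pick_loss_tag_for_derived_perplexity_alt (tags : List String) : Option String :=
  match pvPriority.find? (fun t => tags.contains t) with
  | some t => some t
  | none =>
    let sw := tags.foldl pvStep (none, none)
    match sw.1 with
    | some s => some s
    | none => sw.2

-- ===== PRECONDITION & SPEC =====
def Spec_pick_loss_tag_for_derived_perplexity (tags : List String) (out : Option String) : Prop := out = pick_loss_tag_for_derived_perplexity_alt tags
instance (tags : List String) (out : Option String) : Decidable (Spec_pick_loss_tag_for_derived_perplexity tags out) := by unfold Spec_pick_loss_tag_for_derived_perplexity; infer_instance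

-- ===== CLAIM (what is proved, stated in full; the proofs are below) =====
def Claim_equal_pick_loss_tag_for_derived_perplexity : Prop := ∀ (tags : List String), Dom_pick_loss_tag_for_derived_perplexity tags → Spec_pick_loss_tag_for_derived_perplexity tags (pick_loss_tag_for_derived_perplexity tags)

-- ===== LEMMAS AND PROOFS =====

-- one step of B's pass, expressed through the two predicates
theorem pvStep_eq (sw : Option String × Option String) (t : String) :
    pvStep sw t = ((if sw.1 = none && pvStrong t then some t else sw.1),
                   (if sw.2 = none && pvWeak t then some t else sw.2)) := by
  cases h1 : PySem.Str.isIn "loss" (PySem.Str.lower t) <;>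
    cases h2 : (PySem.Str.isIn "val" (PySem.Str.lower t) || PySem.Str.isIn "eval" (PySem.Str.lower t) || PySem.Str.isIn "test" (PySem.Str.lower t)) <;>
    rcases sw with ⟨s, w⟩ <;> cases s <;> cases w <;>
    simp only [pvStep, pvStrong, pvWeak, h1, h2] <;> simp

-- invariant of B's single pass: it computes the first strong and first weak matches,
-- each shadowed by an already-found accumulator value
theorem pvStep_foldl (l : List String) (s w : Option String) :
    l.foldl pvStep (s, w) = (s.or (l.find? pvStrong), w.or (l.find? pvWeak)) := by
  induction l generalizing s w with
  | nil => simp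
  | cons t ts ih =>
    rw [List.foldl_cons, pvStep_eq, ih]
    cases hS : pvStrong t <;> cases hW : pvWeak t <;> cases s <;> cases w <;>
      simp [hS, hW]

-- ===== VERDICT (by name: the statement is the Claim_ definition above) =====
theorem pick_loss_tag_for_derived_perplexity_spec : Claim_equal_pick_loss_tag_for_derived_perplexity := by
  intro tags _
  show pick_loss_tag_for_derived_perplexity tags = pick_loss_tag_for_derived_perplexity_alt tags
  unfold pick_loss_tag_for_derived_perplexity pick_loss_tag_for_derived_perplexity_alt
  cases pvPriority.find? (fun t => tags.contains t) with
  | some t => rfl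
  | none =>
    rw [pvStep_foldl tags none none]
    cases tags.find? pvStrong <;> cases tags.find? pvWeak <;> rfl
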